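-- pv_equiv track=rewrite | github.com/Bolshevik35/CMPT365 | converter.py | string2baudot
-- ===== SOURCE A (Python) =====
-- BAUDOT_LETTER = {"": "00000000", "T": "00000001", "\r": "00000010", "O": "00000011", " ": "00000100",
--          "H": "00000101", "N": "00000110", "M": "00000111", "\n": "00001000", "L": "00001001",
--          "R": "00001010", "G": "00001011", "I": "00001100", "P": "00001101", "C": "00001110",
--          "V": "00001111", "E": "00010000", "Z": "00010001", "D": "00010010", "B": "00010011",
--          "S": "00010100", "Y": "00010101", "F": "00010110", "X": "00010111", "A": "00011000",
--          "W": "00011001", "J": "00011010", "U": "00011100", "Q": "00011101", "K": "00011110" }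
--
-- BAUDOT_FIGURE = {"": "00000000", "5": "00000001", "\r": "00000010", "9": "00000011", " ": "00000100",
--          "": "00000101", ",": "00000110", ".": "00000111", "\n": "00001000", ")": "00001001",
--          "4": "00001010", "&": "00001011", "8": "00001100", "0": "00001101", ":": "00001110",
--          ";": "00001111", "3": "00010000", "\"": "00010001", "$": "00010010", "?": "00010011",
--          "\a": "00010100", "6": "00010101", "!": "00010110", "/": "00010111", "-": "00011000",
--          "2": "00011001", "\'": "00011010", "7": "00011100", "1": "00011101", "(": "00011110" }
--
-- SPECIAL_CASE = ["", "\r"," ","\n"]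
--
-- def string2baudot (string):
--   output = ""
--   previous = ""
--   for char in string.upper():
--     if not previous:
--       temp = BAUDOT_LETTER.get(char, "")
--       if char in SPECIAL_CASE:
--         output += temp
--       if not temp:
--         output += "00011011" + BAUDOT_FIGURE.get(char, "")
--       else:
--         output += "00011111" + temp
--     else:
--       temp = BAUDOT_LETTER.get(char, "")
--       check = BAUDOT_LETTER.get(previous, "")
--       if char in SPECIAL_CASE:
--         output += temp
--       elif not check:
--         if not temp:
--           output += BAUDOT_FIGURE.get(char, "")
--         else:
--           output += "00011111" + temp
--       else:
--         if not temp: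
--           output += "00011011" + BAUDOT_FIGURE.get(char, "")
--         else:
--           output += temp
--     if char not in SPECIAL_CASE:
--       previous = char
--   return output
-- ===== SOURCE B (Python) =====
-- # value v (1..30) -> char, packed into two parallel index strings; \x00 marks unused slots
-- LETTERS = "\x00T\rO HNM\nLRGIPCVEZDBSYFXAWJ\x00UQK"
-- FIGURES = "\x005\r9 \x00,.\n)4&80:;3\"$?\x076!/-2'\x0071("
--
--
-- def string2baudot(string):
--     # table-free single pass: look the character up by position in an index string
--     # and render its Baudot value with format(v, '08b'); explicit shift-mode state.
--     bits = []
--     mode = None  # None initially, then 'L' or 'F'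
--     for ch in string.upper():
--         lv = LETTERS.find(ch)
--         if ch in "\r \n":
--             bits.append(format(lv, '08b'))  # shift-neutral, mode unchanged
--         elif lv > 0:
--             if mode != 'L':
--                 bits.append("00011111")
--                 mode = 'L'
--             bits.append(format(lv, '08b'))
--         else:
--             if mode != 'F':
--                 bits.append("00011011")
--                 mode = 'F'
--             fv = FIGURES.find(ch)
--             bits.append(format(fv, '08b') if fv > 0 else "")
--     return "".join(bits)
-- ===== Notes on version B (the rewrite author's own statement) =====
-- stated objective: alternative
-- what changed: B drops A's two literal code dictionaries and previous-character bookkeeping entirely: it looks each character up by position in two 31-char index strings (str.find gives the Baudot value, rendered with format(v,'08b')) and keeps an explicit shift-mode flag, in one pass joined at the end.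
-- intended difference: On strings whose first character is '\r', ' ' or '\n', A emits each leading shift-neutral character's code twice around a spurious letter-shift code (its first-iteration branch both appends the code and falls through to the shift branch); B emits the code exactly once, the intended Baudot encoding. — e.g. on string2baudot(" "): A returns "000001000001111100000100", B returns "00000100"
import Mathlib
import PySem

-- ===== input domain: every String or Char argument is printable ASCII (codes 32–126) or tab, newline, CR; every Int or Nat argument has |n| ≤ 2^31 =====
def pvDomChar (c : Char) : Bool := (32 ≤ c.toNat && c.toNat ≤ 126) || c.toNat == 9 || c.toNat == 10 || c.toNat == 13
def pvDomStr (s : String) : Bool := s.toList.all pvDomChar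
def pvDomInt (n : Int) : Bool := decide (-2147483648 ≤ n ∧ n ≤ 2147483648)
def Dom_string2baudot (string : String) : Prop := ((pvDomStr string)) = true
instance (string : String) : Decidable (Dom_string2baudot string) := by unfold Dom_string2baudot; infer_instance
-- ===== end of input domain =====

-- B replaces A's two literal code tables and previous-character bookkeeping by a positional lookup in
-- two index strings (char -> Baudot value via str.find, rendered with format(v,'08b')) plus an explicit
-- shift-mode flag; on strings whose first character is CR/space/LF, A emits that code twice around a
-- spurious letter-shift and B emits it once (see D_ below).

-- ===== PORT A =====
-- BAUDOT_LETTER.get(char, "") — the "" key can never equal a character, so it is unreachable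
def pvLetterGet (c : Char) : String :=
  match c with
  | 'T' => "00000001" | '\r' => "00000010" | 'O' => "00000011" | ' ' => "00000100"
  | 'H' => "00000101" | 'N' => "00000110" | 'M' => "00000111" | '\n' => "00001000"
  | 'L' => "00001001" | 'R' => "00001010" | 'G' => "00001011" | 'I' => "00001100"
  | 'P' => "00001101" | 'C' => "00001110" | 'V' => "00001111" | 'E' => "00010000"
  | 'Z' => "00010001" | 'D' => "00010010" | 'B' => "00010011" | 'S' => "00010100"
  | 'Y' => "00010101" | 'F' => "00010110" | 'X' => "00010111" | 'A' => "00011000"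
  | 'W' => "00011001" | 'J' => "00011010" | 'U' => "00011100" | 'Q' => "00011101"
  | 'K' => "00011110"
  | _ => ""

-- BAUDOT_FIGURE.get(char, "") — the duplicate "" key of the Python dict is likewise unreachable
def pvFigureGet (c : Char) : String :=
  match c with
  | '5' => "00000001" | '\r' => "00000010" | '9' => "00000011" | ' ' => "00000100"
  | ',' => "00000110" | '.' => "00000111" | '\n' => "00001000" | ')' => "00001001"
  | '4' => "00001010" | '&' => "00001011" | '8' => "00001100" | '0' => "00001101"
  | ':' => "00001110" | ';' => "00001111" | '3' => "00010000" | '"' => "00010001"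
  | '$' => "00010010" | '?' => "00010011" | '\x07' => "00010100" | '6' => "00010101"
  | '!' => "00010110" | '/' => "00010111" | '-' => "00011000" | '2' => "00011001"
  | '\'' => "00011010" | '7' => "00011100" | '1' => "00011101" | '(' => "00011110"
  | _ => ""

-- char in SPECIAL_CASE  (the "" entry of the list can never equal a character)
def pvIsSpecial (c : Char) : Bool := c == '\r' || c == ' ' || c == '\n'

-- loop state: (output so far, previous)   previous = none ↔ Python's previous == ""
def pvStepA (s : List Char × Option Char) (c : Char) : List Char × Option Char :=
  let temp := (pvLetterGet c).toList
  let out :=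
    match s.2 with
    | none =>
      let o := if pvIsSpecial c then s.1 ++ temp else s.1
      if temp.isEmpty then o ++ "00011011".toList ++ (pvFigureGet c).toList
      else o ++ "00011111".toList ++ temp
    | some p =>
      let check := (pvLetterGet p).toList
      if pvIsSpecial c then s.1 ++ temp
      else if check.isEmpty then
        if temp.isEmpty then s.1 ++ (pvFigureGet c).toList
        else s.1 ++ "00011111".toList ++ temp
      else
        if temp.isEmpty then s.1 ++ "00011011".toList ++ (pvFigureGet c).toList
        else s.1 ++ temp
  (out, if pvIsSpecial c then s.2 else some c)

def string2baudot (string : String) : String :=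
  String.ofList (((PySem.Str.upper string).toList.foldl pvStepA ([], none)).1)

-- ===== PORT B =====
-- B's index strings LETTERS / FIGURES as char lists (value v -> char at position v; '\x00' = unused slot)
def pvLetters : List Char :=
  ['\x00','T','\r','O',' ','H','N','M','\n','L','R','G','I','P','C','V','E','Z',
   'D','B','S','Y','F','X','A','W','J','\x00','U','Q','K']
def pvFigures : List Char :=
  ['\x00','5','\r','9',' ','\x00',',','.','\n',')','4','&','8','0',':',';','3',
   '"','$','?','\x07','6','!','/','-','2','\'','\x00','7','1','(']

-- s.find(ch) for a single-character needle: first index or -1 (exact for that case)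
def pvFind (l : List Char) (c : Char) : Int :=
  match l with
  | [] => -1
  | x :: xs => if x == c then 0 else (let r := pvFind xs c; if r = -1 then -1 else r + 1)

-- format(v, '08b') for v ≥ 0 (B only renders nonnegative finds): binary digits, zero-padded to 8
def pvBin8 (v : Int) : List Char :=
  let b := Nat.toDigits 2 v.toNat
  List.replicate (8 - b.length) '0' ++ b

-- loop state: (pieces, mode)   mode = none initially, some true = 'L', some false = 'F'
def pvStepB (s : List (List Char) × Option Bool) (c : Char) : List (List Char) × Option Bool :=
  let lv := pvFind pvLetters c
  if c == '\r' || c == ' ' || c == '\n' then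
    (s.1 ++ [pvBin8 lv], s.2)
  else if 0 < lv then
    let p := if s.2 = some true then s.1 else s.1 ++ ["00011111".toList]
    (p ++ [pvBin8 lv], some true)
  else
    let p := if s.2 = some false then s.1 else s.1 ++ ["00011011".toList]
    let fv := pvFind pvFigures c
    (p ++ [if 0 < fv then pvBin8 fv else []], some false)

def string2baudot_alt (string : String) : String :=
  String.ofList (PySem.Chars.join [] (((PySem.Str.upper string).toList.foldl pvStepB ([], none)).1))

-- ===== PRECONDITION & SPEC =====
-- On strings starting with '\r', ' ' or '\n', A emits each leading shift-neutral character twice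
-- with a spurious letter-shift code in between (its first-iteration branch both appends the code and
-- falls through to the shift branch); B emits each such character's code exactly once, which is the
-- intended Baudot encoding.
def D_string2baudot (string : String) : Prop :=
  string.toList ≠ [] ∧
    (string.toList.headD 'A' = '\r' ∨ string.toList.headD 'A' = ' ' ∨ string.toList.headD 'A' = '\n')
instance (string : String) : Decidable (D_string2baudot string) := by
  unfold D_string2baudot; infer_instance

def Spec_string2baudot (string : String) (out : String) : Prop :=
  ¬ D_string2baudot string → out = string2baudot_alt string
instance (string : String) (out : String) : Decidable (Spec_string2baudot string out) := by
  unfold Spec_string2baudot; infer_instance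

def pvDiffWitness_string2baudot : String := " "
def pvDiffWitnessOut_string2baudot : String × String := ("000001000001111100000100", "00000100")

-- ===== CLAIM (what is proved, stated in full; the proofs are below) =====
def Claim_unchanged_string2baudot : Prop :=
  ∀ (string : String), Dom_string2baudot string → Spec_string2baudot string (string2baudot string)
def Claim_changed_string2baudot : Prop :=
  Dom_string2baudot (pvDiffWitness_string2baudot) ∧ D_string2baudot (pvDiffWitness_string2baudot) ∧
  string2baudot (pvDiffWitness_string2baudot) = pvDiffWitnessOut_string2baudot.1 ∧
  string2baudot_alt (pvDiffWitness_string2baudot) = pvDiffWitnessOut_string2baudot.2 ∧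
  pvDiffWitnessOut_string2baudot.1 ≠ pvDiffWitnessOut_string2baudot.2
def Claim_exact_string2baudot : Prop :=
  ∀ (string : String), Dom_string2baudot string → D_string2baudot string →
    string2baudot string ≠ string2baudot_alt string

-- ===== LEMMAS AND PROOFS =====

-- proof-side reformulation of B's step in terms of A's tables (used only below; the ports above
-- never mention it): pvStepB is extensionally equal to it (pvStepB_ext)
def pvStepBSpec (s : List (List Char) × Option Bool) (c : Char) : List (List Char) × Option Bool :=
  let code := (pvLetterGet c).toList
  if pvIsSpecial c then (s.1 ++ [code], s.2)
  else
    let letter := !code.isEmpty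
    let pieces :=
      if s.2 = some letter then s.1
      else s.1 ++ [if letter then "00011111".toList else "00011011".toList]
    (pieces ++ [if letter then code else (pvFigureGet c).toList], some letter)

theorem pvFind_neg {l : List Char} {c : Char} (h : c ∉ l) : pvFind l c = -1 := by
  induction l with
  | nil => rfl
  | cons x xs ih =>
    simp only [List.mem_cons, not_or] at h
    simp only [pvFind]
    rw [if_neg (by simp [beq_iff_eq]; exact fun hx => h.1 hx.symm), ih h.2]
    simp

theorem pvLetterGet_not_mem {c : Char} (h : c ∉ pvLetters) : pvLetterGet c = "" := by
  unfold pvLetterGet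
  split <;> simp_all [pvLetters]

theorem pvFigureGet_not_mem {c : Char} (h : c ∉ pvFigures) : pvFigureGet c = "" := by
  unfold pvFigureGet
  split <;> simp_all [pvFigures]

theorem pvLfind_spec (c : Char) :
    (0 < pvFind pvLetters c ∧ pvBin8 (pvFind pvLetters c) = (pvLetterGet c).toList ∧
      (pvLetterGet c).toList.isEmpty = false) ∨
    (¬ 0 < pvFind pvLetters c ∧ (pvLetterGet c).toList = []) := by
  by_cases hm : c ∈ pvLetters
  · fin_cases hm <;> decide
  · right
    rw [pvFind_neg hm, pvLetterGet_not_mem hm]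
    exact ⟨by decide, rfl⟩

theorem pvFfind_spec (c : Char) :
    (0 < pvFind pvFigures c ∧ pvBin8 (pvFind pvFigures c) = (pvFigureGet c).toList) ∨
    (¬ 0 < pvFind pvFigures c ∧ (pvFigureGet c).toList = []) := by
  by_cases hm : c ∈ pvFigures
  · fin_cases hm <;> decide
  · right
    rw [pvFind_neg hm, pvFigureGet_not_mem hm]
    exact ⟨by decide, rfl⟩

theorem pvStepB_eq (s : List (List Char) × Option Bool) (c : Char) :
    pvStepB s c = pvStepBSpec s c := by
  obtain ⟨acc, st⟩ := s
  by_cases hs : pvIsSpecial c = true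
  · have hsB : (c == '\r' || c == ' ' || c == '\n') = true := hs
    have h1 : pvBin8 (pvFind pvLetters c) = (pvLetterGet c).toList := by
      simp only [pvIsSpecial, Bool.or_eq_true, beq_iff_eq] at hs
      rcases hs with (rfl | rfl) | rfl <;> decide
    simp [pvStepB, pvStepBSpec, hsB, hs, h1]
  · have hsB : (c == '\r' || c == ' ' || c == '\n') = false := by
      simpa [pvIsSpecial] using hs
    rcases pvLfind_spec c with ⟨hpos, hcode, hne⟩ | ⟨hneg, hempty⟩
    · simp [pvStepB, pvStepBSpec, hsB, hs, hpos, hcode, hne]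
    · have hfig : (if 0 < pvFind pvFigures c then pvBin8 (pvFind pvFigures c) else []) =
          (pvFigureGet c).toList := by
        rcases pvFfind_spec c with ⟨hp, hc⟩ | ⟨hn, he⟩
        · rw [if_pos hp, hc]
        · rw [if_neg hn, he]
      simp [pvStepB, pvStepBSpec, hsB, hs, hneg, hempty, hfig]

theorem pvStepB_ext : pvStepB = pvStepBSpec :=
  funext fun s => funext fun c => pvStepB_eq s c

theorem pvJoinNil (l : List (List Char)) : PySem.Chars.join [] l = l.flatten := by
  induction l with
  | nil => rfl
  | cons x xs ih =>
    cases xs with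
    | nil => simp [PySem.Chars.join, List.intercalate, List.intersperse]
    | cons y ys =>
      simp only [PySem.Chars.join, List.intercalate] at ih ⊢
      rw [show List.intersperse ([] : List Char) (x :: y :: ys) =
            x :: [] :: List.intersperse [] (y :: ys) from rfl]
      simp only [List.flatten_cons, List.nil_append] at ih ⊢
      rw [ih]

theorem pvSpecial_upper (c : Char) :
    pvIsSpecial (PySem.Chars.upperChar c) = pvIsSpecial c := by
  unfold PySem.Chars.upperChar
  by_cases h : PySem.Chars.islower c = true
  · rw [if_pos h]
    have h' : 'a' ≤ c ∧ c ≤ 'z' := by simpa [PySem.Chars.islower] using h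
    simp only [Char.le_def, UInt32.le_iff_toNat_le] at h'
    have hlo : 97 ≤ c.toNat ∧ c.toNat ≤ 122 := h'
    have hval : Nat.isValidChar (c.toNat - 32) := Or.inl (by omega)
    have hv : (Char.ofNat (c.toNat - 32)).toNat = c.toNat - 32 := by
      rw [Char.toNat_ofNat, if_pos hval]
    have h1 : pvIsSpecial (Char.ofNat (c.toNat - 32)) = false := by
      simp only [pvIsSpecial, Bool.or_eq_false_iff, beq_eq_false_iff_ne, ne_eq]
      refine ⟨⟨?_, ?_⟩, ?_⟩ <;> intro hEq <;>
        · have h13 := congrArg Char.toNat hEq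
          rw [hv] at h13
          simp only [show ('\r').toNat = 13 from rfl, show (' ').toNat = 32 from rfl,
            show ('\n').toNat = 10 from rfl] at h13
          omega
    have h2 : pvIsSpecial c = false := by
      simp only [pvIsSpecial, Bool.or_eq_false_iff, beq_eq_false_iff_ne, ne_eq]
      refine ⟨⟨?_, ?_⟩, ?_⟩ <;> intro hEq <;>
        · have h13 := congrArg Char.toNat hEq
          simp only [show ('\r').toNat = 13 from rfl, show (' ').toNat = 32 from rfl,
            show ('\n').toNat = 10 from rfl] at h13
          omega
    rw [h1, h2]
  · rw [if_neg h]

theorem pvStepA_out (out : List Char) (st : Option Char) (c : Char) :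
    pvStepA (out, st) c = (out ++ (pvStepA ([], st) c).1, (pvStepA ([], st) c).2) := by
  cases st <;> simp only [pvStepA] <;> split_ifs <;> simp

theorem pvFoldA_prefix (cs : List Char) (out : List Char) (st : Option Char) :
    cs.foldl pvStepA (out, st) =
      (out ++ (cs.foldl pvStepA ([], st)).1, (cs.foldl pvStepA ([], st)).2) := by
  induction cs generalizing out st with
  | nil => simp
  | cons c cs ih =>
    simp only [List.foldl_cons]
    rw [pvStepA_out, ih, ih (pvStepA ([], st) c).1 (pvStepA ([], st) c).2]
    simp [List.append_assoc]

theorem pvStepBSpec_out (acc : List (List Char)) (st : Option Bool) (c : Char) :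
    pvStepBSpec (acc, st) c = (acc ++ (pvStepBSpec ([], st) c).1, (pvStepBSpec ([], st) c).2) := by
  simp only [pvStepBSpec] <;> split_ifs <;> simp

theorem pvFoldBSpec_prefix (cs : List Char) (acc : List (List Char)) (st : Option Bool) :
    cs.foldl pvStepBSpec (acc, st) =
      (acc ++ (cs.foldl pvStepBSpec ([], st)).1, (cs.foldl pvStepBSpec ([], st)).2) := by
  induction cs generalizing acc st with
  | nil => simp
  | cons c cs ih =>
    simp only [List.foldl_cons]
    rw [pvStepBSpec_out, ih, ih (pvStepBSpec ([], st) c).1 (pvStepBSpec ([], st) c).2]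
    simp [List.append_assoc]

theorem pvSync (cs : List Char) : ∀ (p : Char) (out : List Char) (acc : List (List Char)),
    out = acc.flatten →
    (cs.foldl pvStepA (out, some p)).1 =
      ((cs.foldl pvStepBSpec (acc, some (!(pvLetterGet p).toList.isEmpty))).1).flatten := by
  induction cs with
  | nil => intro p out acc h; simpa using h
  | cons c cs ih =>
    intro p out acc h
    simp only [List.foldl_cons]
    cases hs : pvIsSpecial c with
    | true =>
      have h2 := ih p (out ++ (pvLetterGet c).toList) (acc ++ [(pvLetterGet c).toList])
        (by simp [h])
      simp only [pvStepA, pvStepBSpec, hs]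
      simpa using h2
    | false =>
      cases hl : (pvLetterGet c).toList.isEmpty with
      | false =>
        cases hp : (pvLetterGet p).toList.isEmpty with
        | false =>
          have h2 := ih c (out ++ (pvLetterGet c).toList) (acc ++ [(pvLetterGet c).toList])
            (by simp [h])
          simp only [pvStepA, pvStepBSpec, hs, hl, hp]
          simpa [hl] using h2
        | true =>
          have h2 := ih c (out ++ "00011111".toList ++ (pvLetterGet c).toList)
            ((acc ++ ["00011111".toList]) ++ [(pvLetterGet c).toList])
            (by simp [h, List.append_assoc])
          simp only [pvStepA, pvStepBSpec, hs, hl, hp]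
          simpa [hl, List.append_assoc] using h2
      | true =>
        cases hp : (pvLetterGet p).toList.isEmpty with
        | true =>
          have h2 := ih c (out ++ (pvFigureGet c).toList) (acc ++ [(pvFigureGet c).toList])
            (by simp [h])
          simp only [pvStepA, pvStepBSpec, hs, hl, hp]
          simpa [hl] using h2
        | false =>
          have h2 := ih c (out ++ "00011011".toList ++ (pvFigureGet c).toList)
            ((acc ++ ["00011011".toList]) ++ [(pvFigureGet c).toList])
            (by simp [h, List.append_assoc])
          simp only [pvStepA, pvStepBSpec, hs, hl, hp]
          simpa [hl, List.append_assoc] using h2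

theorem pvSyncTop (c : Char) (cs : List Char) (hs : pvIsSpecial c = false) :
    ((c :: cs).foldl pvStepA ([], none)).1 =
      (((c :: cs).foldl pvStepBSpec ([], none)).1).flatten := by
  simp only [List.foldl_cons]
  cases hl : (pvLetterGet c).toList.isEmpty with
  | false =>
    have h2 := pvSync cs c ("00011111".toList ++ (pvLetterGet c).toList)
      ["00011111".toList, (pvLetterGet c).toList] (by simp)
    simp only [pvStepA, pvStepBSpec, hs, hl]
    simpa [hl, List.append_assoc] using h2
  | true =>
    have h2 := pvSync cs c ("00011011".toList ++ (pvFigureGet c).toList)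
      ["00011011".toList, (pvFigureGet c).toList] (by simp)
    simp only [pvStepA, pvStepBSpec, hs, hl]
    simpa [hl, List.append_assoc] using h2

theorem pvSpecialLetter (c : Char) (hs : pvIsSpecial c = true) :
    (pvLetterGet c).toList.isEmpty = false ∧ (pvLetterGet c).toList.length = 8 ∧
      PySem.Chars.upperChar c = c := by
  simp only [pvIsSpecial, Bool.or_eq_true, beq_iff_eq] at hs
  rcases hs with (rfl | rfl) | rfl <;> exact ⟨by decide, by decide, by decide⟩

theorem pvLenLe (cs : List Char) :
    (((cs.foldl pvStepBSpec ([], none)).1).flatten).length ≤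
      ((cs.foldl pvStepA ([], none)).1).length := by
  induction cs with
  | nil => simp
  | cons c cs ih =>
    cases hs : pvIsSpecial c
    · rw [pvSyncTop c cs hs]
    · obtain ⟨hl, _, _⟩ := pvSpecialLetter c hs
      simp only [List.foldl_cons, pvStepA, pvStepBSpec, hs, hl, Bool.false_eq_true, ite_true,
        ite_false, reduceIte, List.nil_append]
      rw [pvFoldA_prefix, pvFoldBSpec_prefix]
      simp only [List.flatten_append, List.length_append]
      have := ih
      simp only [List.flatten_cons, List.flatten_nil, List.append_nil, List.length_append] at *
      omega

-- ===== VERDICT (by name: the statement is the Claim_ definition above) =====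
theorem string2baudot_spec : Claim_unchanged_string2baudot := by
  intro string _ hnd
  unfold string2baudot string2baudot_alt
  rw [pvStepB_ext, pvJoinNil]
  rw [PySem.Str.toList_upper]
  unfold PySem.Chars.upper
  unfold D_string2baudot at hnd
  rcases hcs : string.toList with _ | ⟨c, rest⟩
  · rfl
  · rw [hcs] at hnd
    have hs : pvIsSpecial c = false := by
      simp only [ne_eq, reduceCtorEq, not_false_eq_true, List.headD_cons, true_and,
        not_or] at hnd
      simp only [pvIsSpecial, Bool.or_eq_false_iff, beq_eq_false_iff_ne, ne_eq]
      exact ⟨⟨hnd.1, hnd.2.1⟩, hnd.2.2⟩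
    have hs' : pvIsSpecial (PySem.Chars.upperChar c) = false := by
      rw [pvSpecial_upper]; exact hs
    simp only [List.map_cons]
    rw [pvSyncTop _ _ hs']

theorem string2baudot_changed : Claim_changed_string2baudot := by
  unfold Claim_changed_string2baudot; decide

theorem string2baudot_tight : Claim_exact_string2baudot := by
  intro string _ hd
  unfold D_string2baudot at hd
  rcases hcs : string.toList with _ | ⟨c, rest⟩
  · rw [hcs] at hd; exact absurd rfl hd.1
  · rw [hcs] at hd
    have hs : pvIsSpecial c = true := by
      simp only [List.headD_cons] at hd
      simp only [pvIsSpecial, Bool.or_eq_true, beq_iff_eq]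
      rcases hd.2 with h | h | h
      · exact Or.inl (Or.inl h)
      · exact Or.inl (Or.inr h)
      · exact Or.inr h
    obtain ⟨hl, hlen, hup⟩ := pvSpecialLetter c hs
    unfold string2baudot string2baudot_alt
    rw [pvStepB_ext, pvJoinNil, PySem.Str.toList_upper]
    unfold PySem.Chars.upper
    rw [hcs]
    simp only [List.map_cons, List.foldl_cons, hup]
    simp only [pvStepA, pvStepBSpec, hs, hl, Bool.false_eq_true, ite_true, ite_false, reduceIte,
      List.nil_append]
    rw [pvFoldA_prefix, pvFoldBSpec_prefix]
    intro hEq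
    have hlists := congrArg String.toList hEq
    simp only [String.toList_ofList] at hlists
    have hlen' := congrArg List.length hlists
    have hle := pvLenLe (rest.map PySem.Chars.upperChar)
    simp only [List.length_append, List.flatten_append, List.flatten_cons, List.flatten_nil,
      List.append_nil] at hlen' hle
    have h8 : ("00011111".toList).length = 8 := by decide
    omega
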